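-- pv_equiv track=rewrite | github.com/devHarlemHM/ScrapingWeb | backend/app/scrapping/migrations/loader.py | _split_by_contrast
-- ===== SOURCE A (Python) =====
-- CONTRAST_TOKENS = {
--     "pero",
--     "aunque",
--     "sinembargo",
-- }
--
-- def _split_by_contrast(tokens: list[str]) -> list[list[str]]:
--     segments: list[list[str]] = []
--     current: list[str] = []
--
--     for token in tokens:
--         if token in CONTRAST_TOKENS:
--             if current:
--                 segments.append(current)
--                 current = []
--             continue
--         current.append(token)
--
--     if current:
--         segments.append(current)
--     return segments
-- ===== SOURCE B (Python) =====
-- CONTRAST_TOKENS = {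
--     "pero",
--     "aunque",
--     "sinembargo",
-- }
--
-- def _split_by_contrast(tokens: list[str]) -> list[list[str]]:
--     # run-scanning: skip runs of contrast tokens, slice out maximal runs of non-contrast tokens
--     segments = []
--     i, n = 0, len(tokens)
--     while i < n:
--         if tokens[i] in CONTRAST_TOKENS:
--             i += 1
--             continue
--         j = i
--         while j < n and tokens[j] not in CONTRAST_TOKENS:
--             j += 1
--         segments.append(tokens[i:j])
--         i = j
--     return segments
-- ===== Notes on version B (the rewrite author's own statement) =====
-- stated objective: alternative
-- what changed: Replaces A's element-by-element accumulator loop (append to a current buffer, flush on contrast tokens, final flush) by index-based run scanning: skip each run of contrast tokens, find the end of each maximal non-contrast run and append the slice tokens[i:j] in one step.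
import Mathlib
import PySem

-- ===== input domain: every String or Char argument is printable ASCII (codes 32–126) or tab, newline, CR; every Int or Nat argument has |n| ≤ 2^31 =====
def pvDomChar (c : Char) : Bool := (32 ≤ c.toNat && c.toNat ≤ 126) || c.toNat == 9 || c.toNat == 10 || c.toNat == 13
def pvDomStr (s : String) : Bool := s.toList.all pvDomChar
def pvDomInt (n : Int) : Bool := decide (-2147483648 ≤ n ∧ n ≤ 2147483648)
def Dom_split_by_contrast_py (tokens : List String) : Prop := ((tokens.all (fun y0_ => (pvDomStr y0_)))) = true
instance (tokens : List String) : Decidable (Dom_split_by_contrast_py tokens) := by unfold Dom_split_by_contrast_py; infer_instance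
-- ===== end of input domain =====

-- B replaces A's buffer-accumulator loop with run scanning (skip contrast runs, slice out non-contrast runs); alternative decomposition, same cost.


-- membership test `token in CONTRAST_TOKENS` (a 3-element set of string literals)
def pvIsContrast (t : String) : Bool := t == "pero" || t == "aunque" || t == "sinembargo"

-- ===== PORT A =====
-- A's loop: state (segments, current); flush current on a contrast token, else append; final flush.
def split_by_contrast_py (tokens : List String) : List (List String) :=
  let st := tokens.foldl
    (fun (st : List (List String) × List String) token =>
      if pvIsContrast token then
        (if st.2 ≠ [] then (st.1 ++ [st.2], ([] : List String)) else st)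
      else (st.1, st.2 ++ [token]))
    (([] : List (List String)), ([] : List String))
  if st.2 ≠ [] then st.1 ++ [st.2] else st.1

-- ===== PORT B =====
-- B: skip contrast tokens, take each maximal run of non-contrast tokens as one slice.
def split_by_contrast_py_alt (tokens : List String) : List (List String) :=
  match tokens with
  | [] => []
  | t :: ts =>
    if pvIsContrast t then split_by_contrast_py_alt ts
    else (t :: ts.takeWhile (fun x => !pvIsContrast x))
         :: split_by_contrast_py_alt (ts.dropWhile (fun x => !pvIsContrast x))
termination_by tokens.length
decreasing_by
  · simp
  · have := List.length_dropWhile_le (p := fun x => !pvIsContrast x) (l := ts)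
    simp; omega

-- ===== PRECONDITION & SPEC =====
def Spec_split_by_contrast_py (tokens : List String) (out : List (List String)) : Prop := out = split_by_contrast_py_alt tokens
instance (tokens : List String) (out : List (List String)) : Decidable (Spec_split_by_contrast_py tokens out) := by unfold Spec_split_by_contrast_py; infer_instance

-- ===== CLAIM (what is proved, stated in full; the proofs are below) =====
def Claim_equal_split_by_contrast_py : Prop := ∀ (tokens : List String), Dom_split_by_contrast_py tokens → Spec_split_by_contrast_py tokens (split_by_contrast_py tokens)

-- ===== LEMMAS AND PROOFS =====

-- B's result when a (possibly empty) buffer `cur` is pending before `ts` (proof helper only)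
def pvMerge (cur : List String) : List String → List (List String)
  | [] => if cur = [] then [] else [cur]
  | t :: ts =>
    if pvIsContrast t then (if cur = [] then [] else [cur]) ++ split_by_contrast_py_alt ts
    else pvMerge (cur ++ [t]) ts

lemma pvMerge_ne (cur : List String) (h : cur ≠ []) (ts : List String) :
    pvMerge cur ts =
      (cur ++ ts.takeWhile (fun x => !pvIsContrast x))
        :: split_by_contrast_py_alt (ts.dropWhile (fun x => !pvIsContrast x)) := by
  induction ts generalizing cur with
  | nil => simp [pvMerge, h, split_by_contrast_py_alt]
  | cons t ts ih =>
    by_cases hc : pvIsContrast t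
    · simp [pvMerge, hc, h, List.takeWhile, List.dropWhile, split_by_contrast_py_alt]
    · have := ih (cur ++ [t]) (by simp)
      simp [pvMerge, hc, List.takeWhile, List.dropWhile, this]

lemma pvMerge_nil (ts : List String) : pvMerge [] ts = split_by_contrast_py_alt ts := by
  induction ts with
  | nil => simp [pvMerge, split_by_contrast_py_alt]
  | cons t ts ih =>
    by_cases hc : pvIsContrast t
    · simp [pvMerge, hc, split_by_contrast_py_alt]
    · rw [pvMerge, if_neg hc, pvMerge_ne _ (by simp), split_by_contrast_py_alt]
      simp [hc]

def pvStep (st : List (List String) × List String) (token : String) :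
    List (List String) × List String :=
  if pvIsContrast token then
    (if st.2 ≠ [] then (st.1 ++ [st.2], ([] : List String)) else st)
  else (st.1, st.2 ++ [token])

def pvFin (st : List (List String) × List String) : List (List String) :=
  if st.2 ≠ [] then st.1 ++ [st.2] else st.1

lemma portA_eq (tokens : List String) :
    split_by_contrast_py tokens = pvFin (tokens.foldl pvStep ([], [])) := rfl

lemma foldl_merge (ts : List String) (segs : List (List String)) (cur : List String) :
    pvFin (ts.foldl pvStep (segs, cur)) = segs ++ pvMerge cur ts := by
  induction ts generalizing segs cur with
  | nil =>
    by_cases h : cur = [] <;> simp [pvFin, pvMerge, h]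
  | cons t ts ih =>
    rw [List.foldl_cons]
    by_cases hc : pvIsContrast t
    · by_cases h : cur = []
      · rw [show pvStep (segs, cur) t = (segs, cur) by simp [pvStep, hc, h]]
        simp [ih, pvMerge, hc, h, pvMerge_nil]
      · rw [show pvStep (segs, cur) t = (segs ++ [cur], []) by simp [pvStep, hc, h]]
        rw [ih]
        simp [pvMerge, hc, h, pvMerge_nil]
    · rw [show pvStep (segs, cur) t = (segs, cur ++ [t]) by simp [pvStep, hc]]
      rw [ih]
      simp [pvMerge, hc]

-- ===== VERDICT (by name: the statement is the Claim_ definition above) =====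
theorem split_by_contrast_py_spec : Claim_equal_split_by_contrast_py := by
  intro tokens _
  unfold Spec_split_by_contrast_py
  rw [portA_eq, foldl_merge, pvMerge_nil]
  simp
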